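-- pv_equiv track=rewrite | github.com/Arnavb4/Current-CS-work | Unit 2/Blue/2-BLUE-02.py | find_plausible_gcd
-- ===== SOURCE A (Python) =====
-- def gcd (x, y):
--     if y == 0:
--         return x
--     else:
--         return gcd (y, x % y)
--
-- def gcd_list_helper (list, index):
--     if index == len(list) - 1:
--         return list [index]
--     else:
--         return gcd(list[index], gcd_list_helper(list, index + 1))
--
-- def gcd_of_list(list):
--     return gcd_list_helper(list, 0)
--
-- def find_plausible_gcd (distances, minimum):
--     greater_list = []
--     for num in distances:
--         if distances.count (num) > minimum:
--             greater_list.append(num)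
--     if greater_list == distances:
--         return gcd_of_list (greater_list)
--     elif gcd_of_list (greater_list) > 1:
--         return gcd_of_list (greater_list)
--     else:
--         return find_plausible_gcd (distances, minimum + 1)
-- ===== SOURCE B (Python) =====
-- def _gcd(x, y):
--     while y:
--         x, y = y, x % y
--     return x
--
-- def _list_gcd(lst):
--     g = lst[-1]
--     for v in reversed(lst[:-1]):
--         g = _gcd(v, g)
--     return g
--
-- def find_plausible_gcd(distances, minimum):
--     counts = {}
--     for x in distances:
--         counts[x] = counts.get(x, 0) + 1
--     m = minimum
--     while True:
--         filtered = [x for x in distances if counts[x] > m]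
--         if filtered == distances:
--             return _list_gcd(filtered)
--         g = _list_gcd(filtered)
--         if g > 1:
--             return g
--         m += 1
-- ===== Notes on version B (the rewrite author's own statement) =====
-- stated objective: faster
-- what changed: B precomputes a dict of element counts once (removing the O(n) list.count scan inside the filter pass), replaces the recursion on minimum with a while loop, and computes the list gcd by a right-to-left fold with an iterative Euclid instead of A's index recursion.
import Mathlib
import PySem

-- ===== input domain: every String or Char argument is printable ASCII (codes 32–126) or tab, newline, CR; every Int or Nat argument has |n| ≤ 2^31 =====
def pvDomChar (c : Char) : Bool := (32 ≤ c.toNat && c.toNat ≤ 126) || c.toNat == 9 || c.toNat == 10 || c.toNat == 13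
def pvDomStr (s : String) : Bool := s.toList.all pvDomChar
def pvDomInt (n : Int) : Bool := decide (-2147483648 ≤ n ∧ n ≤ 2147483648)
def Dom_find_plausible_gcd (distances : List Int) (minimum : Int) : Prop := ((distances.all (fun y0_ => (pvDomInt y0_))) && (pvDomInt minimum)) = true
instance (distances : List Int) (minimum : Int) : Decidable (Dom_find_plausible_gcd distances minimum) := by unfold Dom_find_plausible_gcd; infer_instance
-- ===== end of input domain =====

-- B replaces A's O(n²) count-scan per pass by one dict of counts, the recursion on
-- `minimum` by a while loop, and the index-recursive list gcd by a right-to-left fold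
-- with an iterative Euclid (objective: faster filtering passes).

-- ===== PORT A =====
-- def gcd(x, y): recursive Euclid with Python's % (sign of the divisor)
def pyGcdA (x y : Int) : Int :=
  if y = 0 then x else pyGcdA y (PySem.Int.mod x y)
termination_by y.natAbs
decreasing_by
  rename_i hy
  rcases lt_or_gt_of_ne hy with h | h
  · have := PySem.Int.mod_neg_bounds x h; omega
  · have h1 := PySem.Int.mod_nonneg x h; have h2 := PySem.Int.mod_lt x h; omega

-- def gcd_list_helper(list, index): index recursion; fuel makes it total
-- (fuel is always sufficient on calls A performs; list[index] via pyGet?, junk 0 where Python raises)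
def pyGcdListHelperA (fuel : Nat) (l : List Int) (index : Int) : Int :=
  match fuel with
  | 0 => 0
  | f + 1 =>
    if index = (l.length : Int) - 1 then (PySem.List.pyGet? l index).getD 0
    else pyGcdA ((PySem.List.pyGet? l index).getD 0) (pyGcdListHelperA f l (index + 1))

-- def gcd_of_list(list)
def pyGcdOfListA (l : List Int) : Int := pyGcdListHelperA (l.length + 1) l 0

-- the recursion of find_plausible_gcd on minimum, made total by fuel (sufficient wherever A returns)
def pvFpgA (fuel : Nat) (distances : List Int) (minimum : Int) : Int :=
  match fuel with
  | 0 => 0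
  | f + 1 =>
    let greater_list := distances.foldl
      (fun acc num => if ((PySem.List.count distances num : Int) > minimum) then acc ++ [num] else acc) []
    if greater_list = distances then pyGcdOfListA greater_list
    else if pyGcdOfListA greater_list > 1 then pyGcdOfListA greater_list
    else pvFpgA f distances (minimum + 1)

def find_plausible_gcd (distances : List Int) (minimum : Int) : Int :=
  pvFpgA ((distances.length + 1 - minimum).toNat + 1) distances minimum

-- ===== PORT B =====
-- def _gcd(x, y): the `while y: x, y = y, x % y` loop
def pyGcdB (x y : Int) : Int :=
  if y = 0 then x else pyGcdB y (PySem.Int.mod x y)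
termination_by y.natAbs
decreasing_by
  rename_i hy
  rcases lt_or_gt_of_ne hy with h | h
  · have := PySem.Int.mod_neg_bounds x h; omega
  · have h1 := PySem.Int.mod_nonneg x h; have h2 := PySem.Int.mod_lt x h; omega

-- def _list_gcd(lst): g = lst[-1], then fold over reversed(lst[:-1]); junk 0 where Python raises
def pyGcdRightB (l : List Int) : Int :=
  let g0 := (PySem.List.pyGet? l (-1)).getD 0
  ((PySem.List.slice l none (some (-1))).reverse).foldl (fun g v => pyGcdB v g) g0

-- the while-loop of B, made total by fuel (same bound as A's port; sufficient wherever B returns)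
def pvFpgB (fuel : Nat) (distances : List Int) (counts : PySem.Dict Int Int) (m : Int) : Int :=
  match fuel with
  | 0 => 0
  | f + 1 =>
    let filtered := distances.filter (fun x => decide (counts.getD x 0 > m))
    if filtered = distances then pyGcdRightB filtered
    else if pyGcdRightB filtered > 1 then pyGcdRightB filtered
    else pvFpgB f distances counts (m + 1)

def find_plausible_gcd_alt (distances : List Int) (minimum : Int) : Int :=
  let counts := distances.foldl (fun d x => d.insert x (d.getD x 0 + 1)) PySem.Dict.empty
  pvFpgB ((distances.length + 1 - minimum).toNat + 1) distances counts minimum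

-- ===== PRECONDITION & SPEC =====
-- Pre_ = exactly the inputs where A returns: A raises IndexError on the empty list, and
-- whenever every filtering pass (thresholds minimum, minimum+1, …) dies out without the
-- filtered list ever being all of `distances` or having Python-gcd > 1; the Python gcd of a
-- nonempty list is > 1 iff the mathematical gcd is > 1 and its last nonzero element is positive.
def Pre_find_plausible_gcd (distances : List Int) (minimum : Int) : Prop :=
  distances ≠ [] ∧
  ((∀ x ∈ distances, (List.count x distances : Int) > minimum) ∨
   ∃ k ∈ List.range distances.length,
     1 < (distances.filter (fun x => decide ((List.count x distances : Int) > minimum + k))).foldr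
           (fun x (g : Nat) => Int.gcd x (g : Int)) 0 ∧
     0 < (((distances.filter (fun x => decide ((List.count x distances : Int) > minimum + k))).filter
           (fun x => decide (x ≠ 0))).getLast?.getD 0))
instance (distances : List Int) (minimum : Int) : Decidable (Pre_find_plausible_gcd distances minimum) := by unfold Pre_find_plausible_gcd; infer_instance

def pvWitness_find_plausible_gcd : List Int × Int := ([2, 2, 4, 4], 0)

def Spec_find_plausible_gcd (distances : List Int) (minimum : Int) (out : Int) : Prop := out = find_plausible_gcd_alt distances minimum
instance (distances : List Int) (minimum : Int) (out : Int) : Decidable (Spec_find_plausible_gcd distances minimum out) := by unfold Spec_find_plausible_gcd; infer_instance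

-- ===== CLAIM (what is proved, stated in full; the proofs are below) =====
def Claim_equal_find_plausible_gcd : Prop := ∀ (distances : List Int) (minimum : Int), Dom_find_plausible_gcd distances minimum → Pre_find_plausible_gcd distances minimum → Spec_find_plausible_gcd distances minimum (find_plausible_gcd distances minimum)

-- ===== LEMMAS AND PROOFS =====

-- right-fold gcd of a list (0 for []): the common shape of A's and B's list gcd
def gfold : List Int → Int
  | [] => 0
  | [a] => a
  | a :: b :: rest => pyGcdA a (gfold (b :: rest))

theorem witness_ok : Dom_find_plausible_gcd pvWitness_find_plausible_gcd.1 pvWitness_find_plausible_gcd.2 ∧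
    Pre_find_plausible_gcd pvWitness_find_plausible_gcd.1 pvWitness_find_plausible_gcd.2 := by
  constructor <;> decide

-- B's iterative Euclid computes the same values as A's recursive one (same tail recursion)
theorem gcdB_eq_gcdA (x y : Int) : pyGcdB x y = pyGcdA x y := by
  induction x, y using pyGcdA.induct with
  | case1 x => rw [pyGcdB, pyGcdA]; simp
  | case2 x y hy ih => rw [pyGcdB, pyGcdA, if_neg hy, if_neg hy, ih]

theorem gfold_cons (a : Int) (t : List Int) (h : t ≠ []) :
    gfold (a :: t) = pyGcdA a (gfold t) := by
  cases t with
  | nil => exact absurd rfl h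
  | cons b rest => rfl

-- A's index-recursive list gcd is gfold
theorem gcdListHelperA_eq_gfold (l : List Int) :
    ∀ (fuel : Nat) (i : Nat), i < l.length → l.length - i ≤ fuel →
    pyGcdListHelperA fuel l (i : Int) = gfold (l.drop i) := by
  intro fuel
  induction fuel with
  | zero => intro i h1 h2; omega
  | succ f ih =>
    intro i h1 h2
    rw [pyGcdListHelperA, List.drop_eq_getElem_cons h1]
    by_cases hlast : (i : Int) = (l.length : Int) - 1
    · rw [if_pos hlast, PySem.List.pyGet?_ofNat l i h1]
      have : l.drop (i + 1) = [] := List.drop_eq_nil_of_le (by omega)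
      rw [this]
      rfl
    · rw [if_neg hlast, PySem.List.pyGet?_ofNat l i h1]
      have hi1 : i + 1 < l.length := by omega
      have := ih (i + 1) hi1 (by omega)
      rw [gfold_cons _ _ (by
        intro hnil
        have := List.drop_eq_nil_iff.mp hnil
        omega)]
      rw [show ((i : Int) + 1) = ((i + 1 : Nat) : Int) by push_cast; ring] at *
      rw [this, Option.getD_some]

theorem gcdOfListA_eq_gfold (l : List Int) : pyGcdOfListA l = gfold l := by
  cases l with
  | nil =>
    show pyGcdListHelperA 1 [] 0 = gfold []
    rw [pyGcdListHelperA]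
    simp [PySem.List.pyGet?, pyGcdA, gfold, pyGcdListHelperA]
  | cons a t =>
    have h := gcdListHelperA_eq_gfold (a :: t) ((a :: t).length + 1) 0 (by simp) (by omega)
    simpa using h

theorem foldr_gcdA_eq_gfold (ys : List Int) (z : Int) :
    ys.foldr (fun v g => pyGcdA v g) z = gfold (ys ++ [z]) := by
  induction ys with
  | nil => rfl
  | cons a ys ih =>
    rw [List.foldr_cons, ih, List.cons_append]
    exact (gfold_cons a (ys ++ [z]) (by simp)).symm

-- B's reversed fold is gfold too
theorem gcdRightB_eq_gfold (l : List Int) : pyGcdRightB l = gfold l := by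
  rcases List.eq_nil_or_concat l with rfl | ⟨ys, z, rfl⟩
  · rfl
  · unfold pyGcdRightB
    simp only [List.concat_eq_append]
    rw [PySem.List.pyGet?_neg_one_append_singleton]
    have hslice : PySem.List.slice (ys ++ [z]) none (some (-1)) = ys := by
      simp only [PySem.List.slice, Int.reduceNeg, Order.lt_one_iff, PySem.List.clampIdx_neg_ofNat,
        tsub_zero, List.drop_zero, List.length_append, List.length_cons, List.length_nil]
      rw [show ys.length + (0 + 1) - 1 = ys.length by omega, List.take_left]
    rw [hslice, Option.getD_some, List.foldl_reverse]
    rw [show (fun (x y : Int) => pyGcdB x y) = (fun (x y : Int) => pyGcdA x y) from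
      funext fun x => funext fun y => gcdB_eq_gcdA x y]
    exact foldr_gcdA_eq_gfold ys z

-- the two loops agree step for step
theorem fpg_loops_eq (distances : List Int) (fuel : Nat) :
    ∀ (m : Int),
    pvFpgA fuel distances m =
      pvFpgB fuel distances (distances.foldl (fun d x => d.insert x (d.getD x 0 + 1)) PySem.Dict.empty) m := by
  induction fuel with
  | zero => intro m; rfl
  | succ f ih =>
    intro m
    rw [pvFpgA, pvFpgB]
    have hcounts : ∀ x : Int,
        (distances.foldl (fun d x => d.insert x (d.getD x 0 + 1)) PySem.Dict.empty).getD x 0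
          = ((List.count x distances : Nat) : Int) := by
      intro x
      rw [PySem.Dict.getD_foldl_insert_add_one]
      simp
    have hfilters :
        distances.foldl (fun acc num =>
          if ((PySem.List.count distances num : Int) > m) then acc ++ [num] else acc) []
        = distances.filter (fun x => decide
            ((distances.foldl (fun d x => d.insert x (d.getD x 0 + 1)) PySem.Dict.empty).getD x 0 > m)) := by
      rw [PySem.List.foldl_append_ite_eq_filter
        (p := fun num => ((PySem.List.count distances num : Int) > m))]
      rw [List.nil_append]
      apply List.filter_congr
      intro x _
      simp only [decide_eq_decide]
      rw [hcounts x, PySem.List.count_eq]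
    simp only [hfilters, gcdOfListA_eq_gfold, gcdRightB_eq_gfold, ih (m + 1)]

-- ===== VERDICT (by name: the statement is the Claim_ definition above) =====
theorem find_plausible_gcd_spec : Claim_equal_find_plausible_gcd := by
  intro distances minimum _ _
  unfold Spec_find_plausible_gcd find_plausible_gcd find_plausible_gcd_alt
  exact fpg_loops_eq distances _ minimum
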